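-- pv_equiv track=rewrite | github.com/Kinterofoto/bakery-management-system | apps/api/app/services/telegram/formatters.py | format_leads_summary
-- ===== SOURCE A (Python) =====
-- from typing import List, Dict, Any, Optional
--
-- LEAD_STATUS_LABELS = {
--     "prospect": "Prospecto",
--     "contacted": "Contactado",
--     "qualified": "Calificado",
--     "proposal": "Propuesta",
--     "negotiation": "Negociacion",
--     "closed_won": "Ganado",
--     "closed_lost": "Perdido",
--     "client": "Cliente",
-- }
--
-- def format_leads_summary(leads: List[Dict[str, Any]]) -> str:
--     """Format leads summary with names grouped by status."""
--     if not leads: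
--         return "No tienes leads activos."
--
--     # Group by status
--     by_status: Dict[str, List[str]] = {}
--     for lead in leads:
--         status = lead.get("lead_status", "prospect")
--         name = lead.get("name", "N/A")
--         by_status.setdefault(status, []).append(name)
--
--     lines = [f"*Tus Leads ({len(leads)}):*\n"]
--     for status, names in sorted(by_status.items()):
--         label = LEAD_STATUS_LABELS.get(status, status)
--         lines.append(f"*{label}* ({len(names)}):")
--         for name in names[:10]:
--             lines.append(f"  - {name}")
--         if len(names) > 10:
--             lines.append(f"  _...y {len(names) - 10} mas_")
--         lines.append("")
--
--     return "\n".join(lines)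
-- ===== SOURCE B (Python) =====
-- from itertools import groupby
-- from typing import List, Dict, Any
--
-- LEAD_STATUS_LABELS = {
--     "prospect": "Prospecto",
--     "contacted": "Contactado",
--     "qualified": "Calificado",
--     "proposal": "Propuesta",
--     "negotiation": "Negociacion",
--     "closed_won": "Ganado",
--     "closed_lost": "Perdido",
--     "client": "Cliente",
-- }
--
-- def format_leads_summary(leads: List[Dict[str, Any]]) -> str:
--     """Format leads summary with names grouped by status."""
--     if not leads:
--         return "No tienes leads activos."
--
--     # Normalize, then stable-sort by status: names keep their original order
--     # within each status, and groupby walks each contiguous status run.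
--     pairs = sorted(
--         ((lead.get("lead_status", "prospect"), lead.get("name", "N/A")) for lead in leads),
--         key=lambda p: p[0],
--     )
--
--     lines = [f"*Tus Leads ({len(leads)}):*\n"]
--     for status, run in groupby(pairs, key=lambda p: p[0]):
--         names = [name for _, name in run]
--         label = LEAD_STATUS_LABELS.get(status, status)
--         lines.append(f"*{label}* ({len(names)}):")
--         lines.extend(f"  - {name}" for name in names[:10])
--         if len(names) > 10:
--             lines.append(f"  _...y {len(names) - 10} mas_")
--         lines.append("")
--
--     return "\n".join(lines)
-- ===== Notes on version B (the rewrite author's own statement) =====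
-- stated objective: alternative
-- what changed: Replaces the dict-of-lists grouping (setdefault/append then sorted(items)) by a flat list of (status, name) tuples that is stable-sorted by status once and walked with itertools.groupby over contiguous runs.
import Mathlib
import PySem

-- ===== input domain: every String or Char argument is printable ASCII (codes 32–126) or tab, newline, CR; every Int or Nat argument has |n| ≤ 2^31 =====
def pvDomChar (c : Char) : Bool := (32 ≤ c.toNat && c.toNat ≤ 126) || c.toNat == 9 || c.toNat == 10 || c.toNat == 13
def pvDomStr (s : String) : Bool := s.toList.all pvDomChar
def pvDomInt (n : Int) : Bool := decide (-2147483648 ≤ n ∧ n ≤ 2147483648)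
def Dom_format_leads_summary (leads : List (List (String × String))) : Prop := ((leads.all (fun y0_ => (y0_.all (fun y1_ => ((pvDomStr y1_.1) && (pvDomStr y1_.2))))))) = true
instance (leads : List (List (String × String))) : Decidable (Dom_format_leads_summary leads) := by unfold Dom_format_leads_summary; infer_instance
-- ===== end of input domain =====

-- B replaces A's dict-of-lists grouping by a single stable sort of (status, name)
-- pairs followed by a groupby-style walk over contiguous status runs (alternative
-- decomposition, same output).

-- ===== PORT A =====
def LEAD_STATUS_LABELS : PySem.Dict String String :=
  PySem.Dict.mk [("prospect", "Prospecto"), ("contacted", "Contactado"), ("qualified", "Calificado"),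
    ("proposal", "Propuesta"), ("negotiation", "Negociacion"), ("closed_won", "Ganado"),
    ("closed_lost", "Perdido"), ("client", "Cliente")]

def format_leads_summary (leads : List (List (String × String))) : String :=
  if leads = [] then "No tienes leads activos."
  else
    let by_status : PySem.Dict String (List String) :=
      leads.foldl (fun d lead =>
        let status := (PySem.Dict.mk lead).getD "lead_status" "prospect"
        let name := (PySem.Dict.mk lead).getD "name" "N/A"
        d.modify status [] (· ++ [name])) PySem.Dict.empty
    let lines : List String := ["*Tus Leads (" ++ PySem.Int.toStr (leads.length : Int) ++ "):*\n"]
    -- sorted(by_status.items()): dict keys are distinct, so Python's tuple comparison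
    -- never reaches the second components; sorting by the status alone is exact here.
    let lines := (PySem.List.sorted by_status.items (fun p => p.1)).foldl (fun lines p =>
        let label := LEAD_STATUS_LABELS.getD p.1 p.1
        let lines := lines ++ ["*" ++ label ++ "* (" ++ PySem.Int.toStr (p.2.length : Int) ++ "):"]
        let lines := lines ++ (PySem.List.slice p.2 none (some 10)).map (fun n => "  - " ++ n)
        let lines := if p.2.length > 10 then lines ++ ["  _...y " ++ PySem.Int.toStr ((p.2.length : Int) - 10) ++ " mas_"] else lines
        lines ++ [""]) lines
    PySem.Str.join "\n" lines

-- ===== PORT B =====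
def pvPairOf (lead : List (String × String)) : String × String :=
  ((PySem.Dict.mk lead).getD "lead_status" "prospect", (PySem.Dict.mk lead).getD "name" "N/A")

-- groupby helper: names of the leading run with status s, plus the remainder
def pvTakeRun (s : String) : List (String × String) → List String × List (String × String)
  | [] => ([], [])
  | (s', n) :: rest =>
    if s' = s then
      let r := pvTakeRun s rest
      (n :: r.1, r.2)
    else ([], (s', n) :: rest)

lemma pvTakeRun_snd_length (s : String) (l : List (String × String)) :
    (pvTakeRun s l).2.length ≤ l.length := by
  induction l with
  | nil => simp [pvTakeRun]
  | cons p rest ih =>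
    obtain ⟨s', n⟩ := p
    by_cases h : s' = s <;> simp [pvTakeRun, h] <;> omega

-- itertools.groupby over the sorted pairs: one (status, names-of-run) per run
def pvGroupRuns : List (String × String) → List (String × List String)
  | [] => []
  | (s, n) :: rest =>
    let r := pvTakeRun s rest
    (s, n :: r.1) :: pvGroupRuns r.2
termination_by l => l.length
decreasing_by
  have := pvTakeRun_snd_length s rest
  simp at *; omega

def format_leads_summary_alt (leads : List (List (String × String))) : String :=
  if leads = [] then "No tienes leads activos."
  else
    let pairs := leads.map pvPairOf
    let sortedPairs := PySem.List.sorted pairs (fun p => p.1)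
    let lines : List String := ["*Tus Leads (" ++ PySem.Int.toStr (leads.length : Int) ++ "):*\n"]
    let lines := (pvGroupRuns sortedPairs).foldl (fun lines p =>
        let label := LEAD_STATUS_LABELS.getD p.1 p.1
        let lines := lines ++ ["*" ++ label ++ "* (" ++ PySem.Int.toStr (p.2.length : Int) ++ "):"]
        let lines := lines ++ (PySem.List.slice p.2 none (some 10)).map (fun n => "  - " ++ n)
        let lines := if p.2.length > 10 then lines ++ ["  _...y " ++ PySem.Int.toStr ((p.2.length : Int) - 10) ++ " mas_"] else lines
        lines ++ [""]) lines
    PySem.Str.join "\n" lines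

-- ===== PRECONDITION & SPEC =====
def Spec_format_leads_summary (leads : List (List (String × String))) (out : String) : Prop := out = format_leads_summary_alt leads
instance (leads : List (List (String × String))) (out : String) : Decidable (Spec_format_leads_summary leads out) := by unfold Spec_format_leads_summary; infer_instance

-- ===== CLAIM (what is proved, stated in full; the proofs are below) =====
def Claim_equal_format_leads_summary : Prop := ∀ (leads : List (List (String × String))), Dom_format_leads_summary leads → Spec_format_leads_summary leads (format_leads_summary leads)

-- ===== LEMMAS AND PROOFS =====

-- pvTakeRun is takeWhile/dropWhile of the "same status" predicate
lemma pvTakeRun_eq (s : String) (l : List (String × String)) :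
    pvTakeRun s l = ((l.takeWhile (fun p => p.1 == s)).map (·.2), l.dropWhile (fun p => p.1 == s)) := by
  induction l with
  | nil => simp [pvTakeRun]
  | cons p rest ih =>
    obtain ⟨s', n⟩ := p
    by_cases h : s' = s <;> simp [pvTakeRun, h, List.takeWhile_cons, List.dropWhile_cons, ih]

lemma filter_insertBy (x : String × String) (ys : List (String × String))
    (hys : ys.Pairwise (fun a b => a.1 ≤ b.1)) (s : String) :
    (PySem.List.insertBy (fun a b => decide (a.1 < b.1)) x ys).filter (fun p => p.1 == s)
      = ys.filter (fun p => p.1 == s) ++ (if x.1 = s then [x] else []) := by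
  induction ys with
  | nil =>
    by_cases hx : x.1 = s <;> simp [PySem.List.insertBy, List.filter, hx]
  | cons y ys ih =>
    rw [List.pairwise_cons] at hys
    by_cases hlt : x.1 < y.1
    · simp only [PySem.List.insertBy, hlt, decide_true, if_true]
      by_cases hx : x.1 = s
      · have hys0 : (y :: ys).filter (fun p => p.1 == s) = [] := by
          apply List.filter_eq_nil_iff.2
          intro p hp
          have hpl : x.1 < p.1 := by
            rcases hp with _ | hp
            · exact hlt
            · exact lt_of_lt_of_le hlt (hys.1 p (by assumption))
          simp; intro h; subst hx; exact absurd h (ne_of_gt hpl)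
        rw [List.filter_cons_of_pos (by simp [hx]), hys0]
        simp [hx]
      · rw [List.filter_cons_of_neg (by simp [hx])]
        simp [hx]
    · simp only [PySem.List.insertBy, hlt, decide_false]
      rw [if_neg (by simp)]
      rw [List.filter_cons, List.filter_cons, ih hys.2]
      split <;> simp

lemma filter_sorted (l : List (String × String)) (s : String) :
    (PySem.List.sorted l (fun p => p.1)).filter (fun p => p.1 == s)
      = l.filter (fun p => p.1 == s) := by
  induction l using List.reverseRecOn with
  | nil => rfl
  | append_singleton l a ih =>
    have h1 : PySem.List.sorted (l ++ [a]) (fun p => p.1)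
        = PySem.List.insertBy (fun p q => decide (p.1 < q.1)) a (PySem.List.sorted l (fun p => p.1)) := by
      rw [PySem.List.sorted_eq_foldl_insertBy, List.foldl_append, ← PySem.List.sorted_eq_foldl_insertBy]
      rfl
    rw [h1, filter_insertBy a _ (PySem.List.sorted_pairwise l (fun p => p.1)) s, ih,
      List.filter_append]
    by_cases ha : a.1 = s
    · simp [List.filter, ha]
    · simp [List.filter_singleton, ha]

lemma ofList_cons_not_mem {s : String} {xs : List String} (h : s ∉ xs) :
    PySem.Set.ofList (s :: xs) = s :: PySem.Set.ofList xs := by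
  rw [PySem.Set.ofList_cons]
  congr 1
  unfold PySem.Set.discard
  apply List.filter_eq_self.2
  intro a ha
  have : a ∈ xs := (PySem.Set.mem_ofList xs a).1 ha
  simp; rintro rfl; exact h this

lemma ofList_sublist (xs : List String) : (PySem.Set.ofList xs).Sublist xs := by
  induction xs with
  | nil => simp [PySem.Set.ofList_nil]
  | cons x xs ih =>
    rw [PySem.Set.ofList_cons]
    exact ((List.filter_sublist (l := PySem.Set.ofList xs) (p := fun y => !y == x)).trans ih).cons₂ x

lemma ofList_cons_dups (s : String) (t xs : List String) (ht : ∀ x ∈ t, x = s) :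
    PySem.Set.ofList (s :: (t ++ xs)) = PySem.Set.ofList (s :: xs) := by
  induction t with
  | nil => rfl
  | cons a t ih =>
    have ha : a = s := ht a (by simp)
    subst ha
    have h2 : PySem.Set.ofList (a :: a :: (t ++ xs)) = PySem.Set.ofList (a :: (t ++ xs)) := by
      rw [PySem.Set.ofList_cons, PySem.Set.ofList_cons]
      congr 1
      unfold PySem.Set.discard
      simp [List.filter_filter]
    simpa [h2] using ih (fun x hx => ht x (by simp [hx]))

lemma pvGroupRuns_spec_aux (N : Nat) : ∀ (l : List (String × String)), l.length ≤ N →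
    l.Pairwise (fun a b => a.1 ≤ b.1) →
    pvGroupRuns l = (PySem.Set.ofList (l.map (·.1))).map
      (fun s => (s, (l.filter (fun p => p.1 == s)).map (·.2))) := by
  induction N with
  | zero =>
    intro l hlen _
    have : l = [] := List.length_eq_zero_iff.1 (Nat.le_zero.1 hlen)
    subst this; simp [pvGroupRuns]
  | succ N ih =>
    intro l hlen hl
    match l with
    | [] => simp [pvGroupRuns]
    | (s, n) :: rest =>
      rw [List.pairwise_cons] at hl
      set P : String × String → Bool := fun p => p.1 == s with hP
      set t := rest.takeWhile P with ht
      set r := rest.dropWhile P with hr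
      have htr : t ++ r = rest := List.takeWhile_append_dropWhile
      have hPt : ∀ p ∈ t, p.1 = s := by
        intro p hp
        have := List.mem_takeWhile_imp hp
        simpa [hP] using this
      have hmem_rest : ∀ p ∈ r, p ∈ rest := fun p hp => (List.dropWhile_sublist P).mem hp
      have hr_pw : r.Pairwise (fun a b => a.1 ≤ b.1) := List.Pairwise.sublist (List.dropWhile_sublist P) hl.2
      have hr_gt : ∀ p ∈ r, s < p.1 := by
        intro p hp
        match hr2 : r with
        | [] => simp [hr2] at hp
        | a :: r' =>
          have hha : P a = false := by
            have := List.head?_dropWhile_not P rest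
            rw [← hr, hr2] at this
            simpa using this
          have has : a.1 ≠ s := by simpa [hP] using hha
          have hsa : s < a.1 := lt_of_le_of_ne (hl.1 a (hmem_rest a (by rw [hr2]; simp))) (Ne.symm has)
          rw [hr2] at hp
          rcases hp with _ | hp
          · exact hsa
          · have : a.1 ≤ p.1 := by
              rw [hr2] at hr_pw
              exact (List.pairwise_cons.1 hr_pw).1 p (by assumption)
            exact lt_of_lt_of_le hsa this
      have hs_notmem : s ∉ r.map (·.1) := by
        intro hmem
        obtain ⟨p, hp, hps⟩ := List.mem_map.1 hmem
        exact absurd hps (ne_of_gt (hr_gt p hp))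
      -- key set
      have hkeys : PySem.Set.ofList (((s, n) :: rest).map (·.1)) = s :: PySem.Set.ofList (r.map (·.1)) := by
        have : ((s, n) :: rest).map (·.1) = s :: (t.map (·.1) ++ r.map (·.1)) := by
          simp [← htr]
        rw [this, ofList_cons_dups s _ _ (by intro x hx; obtain ⟨p, hp, rfl⟩ := List.mem_map.1 hx; exact hPt p hp),
          ofList_cons_not_mem hs_notmem]
      -- filter at s
      have hfiltt : t.filter P = t := List.filter_eq_self.2 (fun p hp => by simp [hP, hPt p hp])
      have hfiltr : r.filter P = [] := List.filter_eq_nil_iff.2 (fun p hp => by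
        simp [hP]; exact Ne.symm (ne_of_lt (hr_gt p hp)))
      have hfilts : ((s, n) :: rest).filter P = (s, n) :: t := by
        rw [List.filter_cons_of_pos (by simp [hP]), ← htr, List.filter_append, hfiltt, hfiltr, List.append_nil]
      -- filter at other statuses
      have hfilt' : ∀ s' ∈ PySem.Set.ofList (r.map (·.1)),
          ((s, n) :: rest).filter (fun p => p.1 == s') = r.filter (fun p => p.1 == s') := by
        intro s' hs'
        have hne : s' ≠ s := by rintro rfl; exact hs_notmem ((PySem.Set.mem_ofList _ _).1 hs')
        rw [List.filter_cons_of_neg (by simp [Ne.symm hne]), ← htr, List.filter_append,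
          List.filter_eq_nil_iff.2 (fun p hp => by simp [hPt p hp, Ne.symm hne]), List.nil_append]
      -- unfold one step of pvGroupRuns
      have hstep : pvGroupRuns ((s, n) :: rest) = (s, n :: t.map (·.2)) :: pvGroupRuns r := by
        rw [pvGroupRuns]
        rw [pvTakeRun_eq]
      have hrlen : r.length ≤ N := by
        have h1 : r.length ≤ rest.length := by
          rw [hr]; exact (List.dropWhile_sublist P).length_le
        simp only [List.length_cons] at hlen
        omega
      rw [hstep, ih r hrlen hr_pw, hkeys, List.map_cons]
      congr 1
      · rw [← hP, hfilts]
        simp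
      · apply List.map_congr_left
        intro s' hs'
        rw [hfilt' s' hs']

-- groupby over a key-sorted list = one entry per distinct status, names filtered
lemma pvGroupRuns_spec (l : List (String × String))
    (hl : l.Pairwise (fun a b => a.1 ≤ b.1)) :
    pvGroupRuns l = (PySem.Set.ofList (l.map (·.1))).map
      (fun s => (s, (l.filter (fun p => p.1 == s)).map (·.2))) :=
  pvGroupRuns_spec_aux l.length l (le_refl _) hl

lemma assoc_eq_map_keys (l : List (String × List String)) (h : (l.map (·.1)).Nodup) :
    l = (l.map (·.1)).map (fun k => (k, (PySem.Dict.mk l).getD k [])) := by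
  induction l with
  | nil => rfl
  | cons p rest ih =>
    obtain ⟨k, v⟩ := p
    simp only [List.map_cons]
    simp only [List.map_cons, List.nodup_cons] at h
    have hhead : (PySem.Dict.mk ((k, v) :: rest)).getD k [] = v := by
      simp [PySem.Dict.getD, PySem.Dict.get?_mk_cons]
    have htail : ∀ k' ∈ rest.map (·.1),
        (fun k' => (k', (PySem.Dict.mk ((k, v) :: rest)).getD k' ([] : List String))) k'
          = (fun k' => (k', (PySem.Dict.mk rest).getD k' [])) k' := by
      intro k' hk'
      have hne : k ≠ k' := fun he => h.1 (he ▸ hk')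
      simp [PySem.Dict.getD, PySem.Dict.get?_mk_cons, hne]
    rw [List.map_congr_left htail, hhead, ← ih h.2]

-- the grouping dict's items, closed form
lemma groupDict_items (pairs : List (String × String)) :
    (pairs.foldl (fun d p => d.modify p.1 [] (· ++ [p.2])) PySem.Dict.empty).items
      = (PySem.Set.ofList (pairs.map (·.1))).map
          (fun s => (s, (pairs.filter (fun p => p.1 == s)).map (·.2))) := by
  set d := pairs.foldl (fun d p => d.modify p.1 [] (· ++ [p.2])) PySem.Dict.empty with hd
  have hkeys : d.keys = PySem.Set.ofList (pairs.map (·.1)) := by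
    rw [hd]
    have := PySem.Dict.keys_foldl_modify_key pairs (fun p => p.1) ([] : List String)
      (fun _ p => fun v => v ++ [p.2]) PySem.Dict.empty
    simpa [PySem.Set.update_nil_left] using this
  have hnd : (d.items.map (·.1)).Nodup := by
    have : d.items.map (·.1) = d.keys := rfl
    rw [this, hkeys]; exact PySem.Set.nodup_ofList _
  have hgetD : ∀ k, d.getD k [] = (pairs.filter (fun p => p.1 == k)).map (·.2) := by
    intro k
    rw [hd]
    simpa using PySem.Dict.getD_foldl_modify_append pairs PySem.Dict.empty k
  have h1 := assoc_eq_map_keys d.items hnd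
  have hkeys' : d.items.map (·.1) = PySem.Set.ofList (pairs.map (·.1)) := hkeys
  rw [h1, hkeys']
  apply List.map_congr_left
  intro k _
  have : PySem.Dict.mk d.items = d := rfl
  rw [this, hgetD k]

-- the two group sequences coincide
lemma groups_eq (pairs : List (String × String)) :
    PySem.List.sorted (pairs.foldl (fun d p => d.modify p.1 [] (· ++ [p.2])) PySem.Dict.empty).items (fun p => p.1)
      = pvGroupRuns (PySem.List.sorted pairs (fun p => p.1)) := by
  have hQpw := PySem.List.sorted_pairwise pairs (fun p : String × String => p.1)
  have hkeyset : PySem.Set.ofList ((PySem.List.sorted pairs (fun p => p.1)).map (·.1))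
      = PySem.List.sorted (PySem.Set.ofList (pairs.map (·.1))) (fun x => x) := by
    symm
    apply PySem.List.sorted_eq_of_perm_of_pairwise_lt
    · apply (List.perm_ext_iff_of_nodup (PySem.Set.nodup_ofList _) (PySem.Set.nodup_ofList _)).2
      intro a
      rw [PySem.Set.mem_ofList, PySem.Set.mem_ofList]
      constructor
      · intro h
        obtain ⟨p, hp, rfl⟩ := List.mem_map.1 h
        exact List.mem_map.2 ⟨p, (PySem.List.mem_sorted pairs _ _ p).1 hp, rfl⟩
      · intro h
        obtain ⟨p, hp, rfl⟩ := List.mem_map.1 h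
        exact List.mem_map.2 ⟨p, (PySem.List.mem_sorted pairs _ _ p).2 hp, rfl⟩
    · have hle : ((PySem.List.sorted pairs (fun p => p.1)).map (·.1)).Pairwise (· ≤ ·) :=
        PySem.List.sorted_map_key_pairwise pairs _
      have hle' := List.Pairwise.sublist (ofList_sublist _) hle
      have hnd : (PySem.Set.ofList ((PySem.List.sorted pairs (fun p => p.1)).map (·.1))).Pairwise (· ≠ ·) :=
        PySem.Set.nodup_ofList _
      exact (hle'.and hnd).imp (fun h => lt_of_le_of_ne h.1 h.2)
  rw [groupDict_items, pvGroupRuns_spec _ hQpw, hkeyset]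
  have hmain : PySem.List.sorted ((PySem.Set.ofList (pairs.map (·.1))).map
        (fun s => (s, (pairs.filter (fun p => p.1 == s)).map (·.2)))) (fun p => p.1)
      = (PySem.List.sorted (PySem.Set.ofList (pairs.map (·.1))) (fun x => x)).map
        (fun s => (s, (pairs.filter (fun p => p.1 == s)).map (·.2))) := by
    apply PySem.List.sorted_eq_of_perm_of_pairwise_lt
    · exact (PySem.List.sorted_perm (PySem.Set.ofList (pairs.map (·.1))) (fun x => x) false).map _
    · exact List.pairwise_map.2 ((PySem.List.sorted_ofList_pairwise_lt (pairs.map (·.1))).imp (fun h => h))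
  rw [hmain]
  apply List.map_congr_left
  intro s _
  rw [filter_sorted]

-- ===== VERDICT (by name: the statement is the Claim_ definition above) =====
theorem format_leads_summary_spec : Claim_equal_format_leads_summary := by
  intro leads _
  unfold Spec_format_leads_summary format_leads_summary format_leads_summary_alt
  by_cases h : leads = []
  · simp [h]
  · simp only [h, if_neg]
    have hfold : leads.foldl (fun d lead =>
        let status := (PySem.Dict.mk lead).getD "lead_status" "prospect"
        let name := (PySem.Dict.mk lead).getD "name" "N/A"
        d.modify status [] (· ++ [name])) PySem.Dict.empty
        = (leads.map pvPairOf).foldl (fun d p => d.modify p.1 [] (· ++ [p.2])) PySem.Dict.empty := by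
      rw [List.foldl_map]; rfl
    rw [hfold, groups_eq (leads.map pvPairOf)]
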